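-- pv_equiv track=rewrite | github.com/pfahlr/rag_writer | src/research/rename_and_clean_pdfs.py | isbn13_is_valid
-- ===== SOURCE A (Python) =====
-- def isbn13_is_valid(isbn13: str) -> bool:
--     if len(isbn13) != 13 or not isbn13.isdigit():
--         return False
--     total = 0
--     for i, ch in enumerate(isbn13):
--         d = int(ch)
--         total += d * (1 if i % 2 == 0 else 3)
--     return total % 10 == 0
-- ===== SOURCE B (Python) =====
-- def isbn13_is_valid(isbn13: str) -> bool:
--     if len(isbn13) != 13 or not isbn13.isdigit():
--         return False
--     odd = sum(int(c) for c in isbn13[::2])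
--     even = sum(int(c) for c in isbn13[1::2])
--     return (odd + 3 * even) % 10 == 0
-- ===== Notes on version B (the rewrite author's own statement) =====
-- stated objective: alternative
-- what changed: Replaces the single parity-branching enumerate loop by two strided slice passes (digits at even and at odd positions summed separately), returning (odd + 3*even) % 10 == 0 with no per-character index-parity test.
import Mathlib
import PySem

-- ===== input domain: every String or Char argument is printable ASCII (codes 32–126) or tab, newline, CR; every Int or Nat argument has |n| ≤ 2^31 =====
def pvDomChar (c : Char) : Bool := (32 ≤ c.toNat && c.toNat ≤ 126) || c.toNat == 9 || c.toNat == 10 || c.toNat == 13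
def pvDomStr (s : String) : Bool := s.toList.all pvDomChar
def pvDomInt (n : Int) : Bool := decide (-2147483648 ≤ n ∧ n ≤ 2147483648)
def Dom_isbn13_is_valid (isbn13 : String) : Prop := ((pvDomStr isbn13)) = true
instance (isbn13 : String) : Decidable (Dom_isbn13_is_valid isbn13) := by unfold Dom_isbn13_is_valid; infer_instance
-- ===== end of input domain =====

-- B replaces A's parity-branching enumerate loop by two strided slice passes summed separately (alternative decomposition, same cost).

-- ===== PORT A =====
-- int(ch) for a single character; exact for '0'..'9', which the isdigit guard guarantees before it is used
def pvDigit (c : Char) : Int := (c.toNat : Int) - 48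

def isbn13_is_valid (isbn13 : String) : Bool :=
  if PySem.Str.len isbn13 ≠ 13 ∨ ¬ PySem.Str.strIsdigit isbn13 then false
  else
    let total := (PySem.List.enumerate isbn13.toList 0).foldl
      (fun total p => total + pvDigit p.2 * (if PySem.Int.mod p.1 2 == 0 then 1 else 3)) 0
    PySem.Int.mod total 10 == 0

-- ===== PORT B =====
-- isbn13[::2] on the character list (every second character, starting at index 0)
def pvStride2 : List Char → List Char
  | [] => []
  | [c] => [c]
  | c :: _ :: rest => c :: pvStride2 rest

def isbn13_is_valid_alt (isbn13 : String) : Bool :=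
  if PySem.Str.len isbn13 ≠ 13 ∨ ¬ PySem.Str.strIsdigit isbn13 then false
  else
    let odd := ((pvStride2 isbn13.toList).map pvDigit).sum
    let even := ((pvStride2 isbn13.toList.tail).map pvDigit).sum
    PySem.Int.mod (odd + 3 * even) 10 == 0

-- ===== PRECONDITION & SPEC =====
def Spec_isbn13_is_valid (isbn13 : String) (out : Bool) : Prop := out = isbn13_is_valid_alt isbn13
instance (isbn13 : String) (out : Bool) : Decidable (Spec_isbn13_is_valid isbn13 out) := by unfold Spec_isbn13_is_valid; infer_instance

-- ===== CLAIM (what is proved, stated in full; the proofs are below) =====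
def Claim_equal_isbn13_is_valid : Prop := ∀ (isbn13 : String), Dom_isbn13_is_valid isbn13 → Spec_isbn13_is_valid isbn13 (isbn13_is_valid isbn13)

-- ===== LEMMAS AND PROOFS =====

-- pvStride2 of a cons is its head followed by pvStride2 of the tail's tail
theorem pvStride2_cons (c : Char) (l : List Char) :
    pvStride2 (c :: l) = c :: pvStride2 l.tail := by
  cases l <;> simp [pvStride2]

-- A's loop, started at an even index i with accumulator acc, totals acc + odd-sum + 3 * even-sum
theorem pv_foldA_eq (l : List Char) :
    ∀ (i acc : Int), PySem.Int.mod i 2 = 0 →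
      (PySem.List.enumerate l i).foldl
        (fun total p => total + pvDigit p.2 * (if PySem.Int.mod p.1 2 == 0 then 1 else 3)) acc
      = acc + ((pvStride2 l).map pvDigit).sum + 3 * ((pvStride2 l.tail).map pvDigit).sum := by
  induction l using pvStride2.induct with
  | case1 => intro i acc _; simp [PySem.List.enumerate, pvStride2]
  | case2 c =>
      intro i acc h
      simp only [PySem.List.enumerate_cons, PySem.List.enumerate_nil, List.foldl_cons,
        List.foldl_nil, h]
      simp [pvStride2]
  | case3 c c' rest ih =>
      intro i acc h
      have hpos : (0:Int) < 2 := by norm_num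
      have h1 : PySem.Int.mod (i + 1) 2 = 1 := by
        rw [PySem.Int.mod_eq_emod_of_pos hpos] at h ⊢; omega
      have h2 : PySem.Int.mod (i + 1 + 1) 2 = 0 := by
        rw [PySem.Int.mod_eq_emod_of_pos hpos] at h ⊢; omega
      rw [PySem.List.enumerate_cons, PySem.List.enumerate_cons]
      simp only [List.foldl_cons, h, h1]
      rw [ih (i + 1 + 1) _ h2]
      simp [pvStride2, pvStride2_cons]
      ring
-- ===== VERDICT (by name: the statement is the Claim_ definition above) =====
theorem isbn13_is_valid_spec : Claim_equal_isbn13_is_valid := by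
  intro s _
  unfold Spec_isbn13_is_valid isbn13_is_valid isbn13_is_valid_alt
  split
  · rfl
  · simp only
    rw [pv_foldA_eq s.toList 0 0 (by decide)]
    ring_nf
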